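-- pv_equiv track=rewrite | github.com/pabenito/QRest | app/core/use_cases/command.py | _remove_sublist
-- ===== SOURCE A (Python) =====
-- from collections import Counter
--
-- def _remove_sublist(original_list: list, sublist: list):
--     sublist_frequencies = Counter(sublist)
--     result_list = []
--     for item in original_list:
--         if sublist_frequencies[item] > 0:
--             sublist_frequencies[item] -= 1
--         else:
--             result_list.append(item)
--     return result_list
-- ===== SOURCE B (Python) =====
-- def _remove_sublist(original_list: list, sublist: list):
--     result = list(original_list)
--     for s in sublist:
--         if s in result:
--             result.remove(s)
--     return result
-- ===== Notes on version B (the rewrite author's own statement) =====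
-- stated objective: simpler
-- what changed: B drops the Counter bookkeeping entirely: it copies the original list and, for each sublist element, removes its first occurrence if present, instead of building a frequency dictionary and filtering in one pass.
import Mathlib
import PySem

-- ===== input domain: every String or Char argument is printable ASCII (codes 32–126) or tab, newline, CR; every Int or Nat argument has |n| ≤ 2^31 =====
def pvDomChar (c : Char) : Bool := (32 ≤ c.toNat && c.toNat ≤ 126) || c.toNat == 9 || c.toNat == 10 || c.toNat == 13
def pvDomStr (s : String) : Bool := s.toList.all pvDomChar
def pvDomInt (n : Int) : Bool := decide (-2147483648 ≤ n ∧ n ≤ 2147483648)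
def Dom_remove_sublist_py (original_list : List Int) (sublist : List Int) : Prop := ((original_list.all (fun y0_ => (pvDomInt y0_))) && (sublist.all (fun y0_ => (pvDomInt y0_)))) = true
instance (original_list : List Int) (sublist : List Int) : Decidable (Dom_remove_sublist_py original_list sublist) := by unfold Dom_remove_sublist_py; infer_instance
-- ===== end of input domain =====

-- B replaces A's Counter-based filtering pass by a plain copy-then-remove-first-occurrence loop (simpler, no frequency dict).


-- ===== PORT A =====
-- sublist_frequencies = Counter(sublist); then one pass over original_list,
-- decrementing the counter (Counter[k] of a missing key reads as 0) or appending.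
def remove_sublist_py (original_list : List Int) (sublist : List Int) : List Int :=
  let sublist_frequencies := PySem.Dict.counter sublist
  (original_list.foldl
    (fun (st : PySem.Dict Int Int × List Int) item =>
      if st.1.getD item 0 > 0 then
        (st.1.insert item (st.1.getD item 0 - 1), st.2)
      else
        (st.1, st.2 ++ [item]))
    (sublist_frequencies, [])).2

-- ===== PORT B =====
-- result = list(original_list); for s in sublist: if s in result: result.remove(s)
-- List Int has no aliasing, so the copy is the fold's start value; list.remove(s)
-- (remove first == occurrence) is List.erase (BEq on Int is =), exact here.
def remove_sublist_py_alt (original_list : List Int) (sublist : List Int) : List Int :=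
  sublist.foldl (fun result s => if s ∈ result then result.erase s else result) original_list

-- ===== PRECONDITION & SPEC =====
def Spec_remove_sublist_py (original_list : List Int) (sublist : List Int) (out : List Int) : Prop := out = remove_sublist_py_alt original_list sublist
instance (original_list : List Int) (sublist : List Int) (out : List Int) : Decidable (Spec_remove_sublist_py original_list sublist out) := by unfold Spec_remove_sublist_py; infer_instance

-- ===== CLAIM (what is proved, stated in full; the proofs are below) =====
def Claim_equal_remove_sublist_py : Prop := ∀ (original_list : List Int) (sublist : List Int), Dom_remove_sublist_py original_list sublist → Spec_remove_sublist_py original_list sublist (remove_sublist_py original_list sublist)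

-- ===== LEMMAS AND PROOFS =====

/-- Canonical form both loops compute: drop, for each value `v`, the first
`max (f v) 0` occurrences of `v`, keep the rest in order. -/
def remF (f : Int → Int) : List Int → List Int
  | [] => []
  | x :: xs =>
    if f x > 0 then remF (fun v => if v = x then f v - 1 else f v) xs
    else x :: remF f xs

theorem remF_congr {f g : Int → Int} : ∀ {r : List Int}, (∀ v ∈ r, f v = g v) → remF f r = remF g r := by
  intro r
  induction r generalizing f g with
  | nil => intro _; rfl
  | cons x xs ih =>
    intro h
    have hx : f x = g x := h x (by simp)
    simp only [remF, hx]
    split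
    · exact ih (fun v hv => by
        by_cases hvx : v = x
        · simp [hvx, hx]
        · simp [hvx, h v (by simp [hv])])
    · rw [ih (fun v hv => h v (by simp [hv]))]

theorem remF_nonpos {f : Int → Int} : ∀ {r : List Int}, (∀ v ∈ r, f v ≤ 0) → remF f r = r := by
  intro r
  induction r generalizing f with
  | nil => intro _; rfl
  | cons x xs ih =>
    intro h
    have hx : ¬ f x > 0 := by have := h x (by simp); omega
    simp only [remF, if_neg hx]
    rw [ih (fun v hv => h v (by simp [hv]))]

/-- One erase step of B, folded into the count function. -/
theorem remF_erase {f : Int → Int} (hf : ∀ v, 0 ≤ f v) (s : Int) :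
    ∀ (r : List Int),
      remF f (if s ∈ r then r.erase s else r) =
        remF (fun v => if v = s then f v + 1 else f v) r := by
  intro r
  induction r generalizing f with
  | nil => rfl
  | cons x xs ih =>
    by_cases hxs : x = s
    · subst hxs
      have hmem : x ∈ x :: xs := by simp
      have herase : (x :: xs).erase x = xs := by simp
      have hpos : (fun v => if v = x then f v + 1 else f v) x > 0 := by
        simp; have := hf x; omega
      simp only [if_pos hmem, herase, remF]
      simp only [if_true]
      rw [if_pos (show f x + 1 > 0 from by have := hf x; omega)]
      apply remF_congr
      intro v _
      by_cases hv : v = x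
      · subst hv; simp
      · simp [hv]
    · -- x ≠ s: the head passes through unchanged on both sides
      have hbump : (fun v => if v = s then f v + 1 else f v) x = f x := by simp [hxs]
      by_cases hs : s ∈ x :: xs
      · have hsxs : s ∈ xs := by cases hs with
          | head => exact absurd rfl hxs
          | tail _ h => exact h
        have herase : (x :: xs).erase s = x :: xs.erase s := by
          rw [List.erase_cons_tail (by simp [hxs])]
        simp only [if_pos hs, herase, remF, hbump]
        split
        · rename_i hfx
          have ih' := ih (f := fun v => if v = x then f v - 1 else f v)
            (fun v => by by_cases hv : v = x <;> simp [hv] <;> [omega; exact hf v])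
          rw [if_pos hsxs] at ih'
          rw [ih']
          apply remF_congr
          intro v _
          by_cases hv1 : v = s <;> by_cases hv2 : v = x <;>
            simp_all
        · have ih' := ih (f := f) hf
          rw [if_pos hsxs] at ih'
          rw [ih']
      · -- s not in the list: both sides equal remF of fns agreeing on members
        rw [if_neg hs]
        apply remF_congr
        intro v hv
        have : v ≠ s := fun h => hs (h ▸ hv)
        simp [this]

/-- B's fold computes `remF` of the occurrence counts of `sublist`. -/
theorem b_loop (ss : List Int) : ∀ (r : List Int),
    ss.foldl (fun result s => if s ∈ result then result.erase s else result) r =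
      remF (fun v => (ss.count v : Int)) r := by
  induction ss with
  | nil =>
    intro r
    simp only [List.foldl_nil]
    rw [remF_nonpos (fun v _ => by simp)]
  | cons s rest ih =>
    intro r
    simp only [List.foldl_cons]
    rw [ih]
    rw [remF_erase (fun v => by positivity) s r]
    apply remF_congr
    intro v _
    by_cases hv : v = s
    · simp [hv]
    · have hv' : ¬ s = v := fun h => hv h.symm
      simp [hv, hv']

/-- A's fold computes `acc ++ remF` of the counts stored in the dict. -/
theorem a_loop : ∀ (xs : List Int) (d : PySem.Dict Int Int) (acc : List Int),
    (xs.foldl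
      (fun (st : PySem.Dict Int Int × List Int) item =>
        if st.1.getD item 0 > 0 then
          (st.1.insert item (st.1.getD item 0 - 1), st.2)
        else
          (st.1, st.2 ++ [item]))
      (d, acc)).2 = acc ++ remF (fun v => d.getD v 0) xs := by
  intro xs
  induction xs with
  | nil => intro d acc; simp [remF]
  | cons x xs ih =>
    intro d acc
    simp only [List.foldl_cons]
    by_cases hx : d.getD x 0 > 0
    · simp only [if_pos hx]
      rw [ih]
      simp only [remF, if_pos hx]
      congr 1
      apply remF_congr
      intro v _
      rw [PySem.Dict.getD_insert]
      by_cases hv : v = x <;> simp [hv]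
    · simp only [if_neg hx]
      rw [ih]
      simp [remF, if_neg hx]

-- ===== VERDICT (by name: the statement is the Claim_ definition above) =====
theorem remove_sublist_py_spec : Claim_equal_remove_sublist_py := by
  intro original_list sublist _
  unfold Spec_remove_sublist_py remove_sublist_py remove_sublist_py_alt
  rw [a_loop, b_loop]
  simp only [List.nil_append]
  apply remF_congr
  intro v _
  rw [PySem.Dict.getD_counter]
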